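-- pv_equiv track=rewrite | github.com/romanchaa997/predictive-propositions-service | .github/ci_metrics_analyzer.py | _prioritize
-- ===== SOURCE A (Python) =====
-- from typing import Dict, List
--
-- def _prioritize(recommendations: List[str]) -> List[str]:
--     """Sort recommendations by level and impact."""
--     level_order = {'Level 1': 0, 'Level 2': 1, 'Level 3': 2, 'Level 4': 3}
--     return sorted(
--         recommendations,
--         key=lambda x: level_order.get(
--             [k for k in level_order if k in x][0] if any(k in x for k in level_order) else 'Level 4',
--             999
--         )
--     )
-- ===== SOURCE B (Python) =====
-- from typing import List
--
-- def _rank(x: str) -> int: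
--     if 'Level 1' in x: return 0
--     if 'Level 2' in x: return 1
--     if 'Level 3' in x: return 2
--     return 3
--
-- def _prioritize(recommendations: List[str]) -> List[str]:
--     b0, b1, b2, b3 = [], [], [], []
--     for x in recommendations:
--         r = _rank(x)
--         if r == 0: b0.append(x)
--         elif r == 1: b1.append(x)
--         elif r == 2: b2.append(x)
--         else: b3.append(x)
--     return b0 + b1 + b2 + b3
-- ===== Notes on version B (the rewrite author's own statement) =====
-- stated objective: faster
-- what changed: Replaced sorted() with a per-comparison key that rebuilds a list comprehension over the label dict by a single pass that precomputes each element's rank (first matching label, default 3) and appends it to one of four buckets, returning the buckets concatenated in rank order; appending in input order preserves the stable-sort tie order.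
import Mathlib
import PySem

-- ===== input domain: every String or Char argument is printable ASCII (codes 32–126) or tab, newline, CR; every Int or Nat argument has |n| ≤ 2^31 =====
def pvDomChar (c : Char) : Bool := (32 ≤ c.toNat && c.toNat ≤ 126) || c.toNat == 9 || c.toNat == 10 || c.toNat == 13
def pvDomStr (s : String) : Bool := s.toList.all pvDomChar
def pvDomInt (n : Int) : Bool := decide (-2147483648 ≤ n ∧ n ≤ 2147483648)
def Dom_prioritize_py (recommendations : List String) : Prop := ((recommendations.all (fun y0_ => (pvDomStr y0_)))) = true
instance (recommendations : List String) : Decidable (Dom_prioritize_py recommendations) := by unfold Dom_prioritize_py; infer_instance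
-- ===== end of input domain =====

-- B replaces the stable sort by a one-pass bucket partition on a precomputed level rank (faster, one pass).

-- ===== PORT A =====
def pvLevelOrder : PySem.Dict String Int :=
  PySem.Dict.ofList [("Level 1", 0), ("Level 2", 1), ("Level 3", 2), ("Level 4", 3)]

-- the sort key lambda; `[k for k in level_order if k in x][0] if any(k in x for k in level_order) else 'Level 4'`:
-- pyGet? 0 of the comprehension is none exactly when the `any(...)` guard is false, so the match is exact.
def pvKeyA (x : String) : Int :=
  pvLevelOrder.getD
    (match PySem.List.pyGet? (pvLevelOrder.keys.filter (fun k => PySem.Str.isIn k x)) 0 with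
      | some k => k
      | none => "Level 4")
    999

def prioritize_py (recommendations : List String) : List String :=
  PySem.List.sorted recommendations pvKeyA

-- ===== PORT B =====
def pvRank (x : String) : Int :=
  if PySem.Str.isIn "Level 1" x then 0
  else if PySem.Str.isIn "Level 2" x then 1
  else if PySem.Str.isIn "Level 3" x then 2
  else 3

def pvStep (b : List String × List String × List String × List String) (x : String) :
    List String × List String × List String × List String :=
  let r := pvRank x
  if r = 0 then (b.1 ++ [x], b.2.1, b.2.2.1, b.2.2.2)
  else if r = 1 then (b.1, b.2.1 ++ [x], b.2.2.1, b.2.2.2)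
  else if r = 2 then (b.1, b.2.1, b.2.2.1 ++ [x], b.2.2.2)
  else (b.1, b.2.1, b.2.2.1, b.2.2.2 ++ [x])

def prioritize_py_alt (recommendations : List String) : List String :=
  let b := recommendations.foldl pvStep ([], [], [], [])
  b.1 ++ b.2.1 ++ b.2.2.1 ++ b.2.2.2

-- ===== PRECONDITION & SPEC =====
def Spec_prioritize_py (recommendations : List String) (out : List String) : Prop := out = prioritize_py_alt recommendations
instance (recommendations : List String) (out : List String) : Decidable (Spec_prioritize_py recommendations out) := by unfold Spec_prioritize_py; infer_instance

-- ===== CLAIM (what is proved, stated in full; the proofs are below) =====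
def Claim_equal_prioritize_py : Prop := ∀ (recommendations : List String), Dom_prioritize_py recommendations → Spec_prioritize_py recommendations (prioritize_py recommendations)

-- ===== LEMMAS AND PROOFS =====

-- the insertion-sort `before` relation used by sorted_eq_foldl_insertBy, on pvRank
def pvBefore (a b : String) : Bool := decide (pvRank a < pvRank b)

lemma key_eq (x : String) : pvKeyA x = pvRank x := by
  unfold pvKeyA pvRank
  rw [show pvLevelOrder.keys = ["Level 1", "Level 2", "Level 3", "Level 4"] from rfl]
  cases h1 : PySem.Str.isIn "Level 1" x <;>
  cases h2 : PySem.Str.isIn "Level 2" x <;>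
  cases h3 : PySem.Str.isIn "Level 3" x <;>
  cases h4 : PySem.Str.isIn "Level 4" x <;>
    simp only [List.filter, h1, h2, h3, h4] <;> decide

lemma rank_cases (x : String) : pvRank x = 0 ∨ pvRank x = 1 ∨ pvRank x = 2 ∨ pvRank x = 3 := by
  unfold pvRank; split_ifs <;> simp

lemma insertBy_append_not_before {α : Type} (before : α → α → Bool) (x : α) (ys zs : List α)
    (h : ∀ y ∈ ys, before x y = false) :
    PySem.List.insertBy before x (ys ++ zs) = ys ++ PySem.List.insertBy before x zs := by
  induction ys with
  | nil => simp
  | cons y t ih =>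
    simp only [List.cons_append, PySem.List.insertBy, h y (by simp)]
    simp only [Bool.false_eq_true, if_false]
    rw [ih (fun z hz => h z (by simp [hz]))]

lemma insertBy_of_forall_before {α : Type} (before : α → α → Bool) (x : α) (zs : List α)
    (h : ∀ y ∈ zs, before x y = true) :
    PySem.List.insertBy before x zs = x :: zs := by
  cases zs with
  | nil => rfl
  | cons z t => simp [PySem.List.insertBy, h z (by simp)]

lemma insert_bucket (x : String) (b0 b1 b2 b3 : List String)
    (h0 : ∀ y ∈ b0, pvRank y = 0) (h1 : ∀ y ∈ b1, pvRank y = 1)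
    (h2 : ∀ y ∈ b2, pvRank y = 2) (h3 : ∀ y ∈ b3, pvRank y = 3) :
    PySem.List.insertBy pvBefore x (b0 ++ (b1 ++ (b2 ++ b3))) =
      (pvStep (b0, b1, b2, b3) x).1 ++ ((pvStep (b0, b1, b2, b3) x).2.1 ++
      ((pvStep (b0, b1, b2, b3) x).2.2.1 ++ (pvStep (b0, b1, b2, b3) x).2.2.2)) := by
  rcases rank_cases x with hr | hr | hr | hr <;> simp only [pvStep, hr] <;> norm_num
  · rw [insertBy_append_not_before pvBefore x b0 _
        (fun y hy => by simp [pvBefore, h0 y hy, hr]),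
      insertBy_of_forall_before pvBefore x _ (fun y hy => by
        simp only [List.mem_append] at hy
        rcases hy with hy | hy | hy
        · simp [pvBefore, hr, h1 y hy]
        · simp [pvBefore, hr, h2 y hy]
        · simp [pvBefore, hr, h3 y hy])]
    try simp
  · rw [insertBy_append_not_before pvBefore x b0 _
        (fun y hy => by simp [pvBefore, h0 y hy, hr]),
      insertBy_append_not_before pvBefore x b1 _
        (fun y hy => by simp [pvBefore, h1 y hy, hr]),
      insertBy_of_forall_before pvBefore x _ (fun y hy => by
        rcases List.mem_append.1 hy with hy | hy
        · simp [pvBefore, hr, h2 y hy]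
        · simp [pvBefore, hr, h3 y hy])]
    try simp
  · rw [insertBy_append_not_before pvBefore x b0 _
        (fun y hy => by simp [pvBefore, h0 y hy, hr]),
      insertBy_append_not_before pvBefore x b1 _
        (fun y hy => by simp [pvBefore, h1 y hy, hr]),
      insertBy_append_not_before pvBefore x b2 _
        (fun y hy => by simp [pvBefore, h2 y hy, hr]),
      insertBy_of_forall_before pvBefore x _ (fun y hy => by
        simp [pvBefore, hr, h3 y hy])]
    try simp
  · rw [insertBy_append_not_before pvBefore x b0 _
        (fun y hy => by simp [pvBefore, h0 y hy, hr]),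
      insertBy_append_not_before pvBefore x b1 _
        (fun y hy => by simp [pvBefore, h1 y hy, hr]),
      insertBy_append_not_before pvBefore x b2 _
        (fun y hy => by simp [pvBefore, h2 y hy, hr]),
      PySem.List.insertBy_of_forall_not_before pvBefore x b3
        (fun y hy => by simp [pvBefore, h3 y hy, hr])]
    try simp

lemma step_rank (b : List String × List String × List String × List String) (x : String)
    (h0 : ∀ y ∈ b.1, pvRank y = 0) (h1 : ∀ y ∈ b.2.1, pvRank y = 1)
    (h2 : ∀ y ∈ b.2.2.1, pvRank y = 2) (h3 : ∀ y ∈ b.2.2.2, pvRank y = 3) :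
    (∀ y ∈ (pvStep b x).1, pvRank y = 0) ∧ (∀ y ∈ (pvStep b x).2.1, pvRank y = 1) ∧
    (∀ y ∈ (pvStep b x).2.2.1, pvRank y = 2) ∧ (∀ y ∈ (pvStep b x).2.2.2, pvRank y = 3) := by
  rcases rank_cases x with hr | hr | hr | hr <;> simp only [pvStep, hr] <;> norm_num
  · exact ⟨fun y hy => hy.elim (h0 y) (fun h => by rw [h]; exact hr), h1, h2, h3⟩
  · exact ⟨h0, fun y hy => hy.elim (h1 y) (fun h => by rw [h]; exact hr), h2, h3⟩
  · exact ⟨h0, h1, fun y hy => hy.elim (h2 y) (fun h => by rw [h]; exact hr), h3⟩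
  · exact ⟨h0, h1, h2, fun y hy => hy.elim (h3 y) (fun h => by rw [h]; exact hr)⟩

lemma foldl_ins_buckets (xs : List String) :
    ∀ b0 b1 b2 b3 : List String,
    (∀ y ∈ b0, pvRank y = 0) → (∀ y ∈ b1, pvRank y = 1) →
    (∀ y ∈ b2, pvRank y = 2) → (∀ y ∈ b3, pvRank y = 3) →
    xs.foldl (fun acc x => PySem.List.insertBy pvBefore x acc) (b0 ++ (b1 ++ (b2 ++ b3))) =
      (xs.foldl pvStep (b0, b1, b2, b3)).1 ++ ((xs.foldl pvStep (b0, b1, b2, b3)).2.1 ++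
      ((xs.foldl pvStep (b0, b1, b2, b3)).2.2.1 ++ (xs.foldl pvStep (b0, b1, b2, b3)).2.2.2)) := by
  induction xs with
  | nil => intro b0 b1 b2 b3 _ _ _ _; rfl
  | cons x t ih =>
    intro b0 b1 b2 b3 h0 h1 h2 h3
    have hs := step_rank (b0, b1, b2, b3) x h0 h1 h2 h3
    simp only [List.foldl_cons]
    rw [insert_bucket x b0 b1 b2 b3 h0 h1 h2 h3]
    have := ih (pvStep (b0, b1, b2, b3) x).1 (pvStep (b0, b1, b2, b3) x).2.1
      (pvStep (b0, b1, b2, b3) x).2.2.1 (pvStep (b0, b1, b2, b3) x).2.2.2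
      hs.1 hs.2.1 hs.2.2.1 hs.2.2.2
    simpa using this

-- ===== VERDICT (by name: the statement is the Claim_ definition above) =====
theorem prioritize_py_spec : Claim_equal_prioritize_py := by
  intro xs _
  unfold Spec_prioritize_py prioritize_py prioritize_py_alt
  rw [show pvKeyA = pvRank from funext key_eq, PySem.List.sorted_eq_foldl_insertBy]
  have := foldl_ins_buckets xs [] [] [] [] (by simp) (by simp) (by simp) (by simp)
  simpa [pvBefore] using this
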